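-- pv_equiv track=rewrite | github.com/microsoft/mssql-python | mssql_python/helpers.py | add_driver_name_to_app_parameter
-- ===== SOURCE A (Python) =====
-- def add_driver_name_to_app_parameter(connection_string):
--     """
--     Modifies the input connection string by appending the APP name.
--
--     Args:
--         connection_string (str): The input connection string.
--
--     Returns:
--         str: The modified connection string.
--     """
--     # Split the input string into key-value pairs
--     parameters = connection_string.split(";")
--
--     # Initialize variables
--     app_found = False
--     modified_parameters = []
--
--     # Iterate through the key-value pairs
--     for param in parameters:
--         if param.lower().startswith("app="):
--             # Overwrite the value with 'MSSQL-Python'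
--             app_found = True
--             key, _ = param.split("=", 1)
--             modified_parameters.append(f"{key}=MSSQL-Python")
--         else:
--             # Keep other parameters as is
--             modified_parameters.append(param)
--
--     # If APP key is not found, append it
--     if not app_found:
--         modified_parameters.append("APP=MSSQL-Python")
--
--     # Join the parameters back into a connection string
--     return ";".join(modified_parameters) + ";"
-- ===== SOURCE B (Python) =====
-- def add_driver_name_to_app_parameter(connection_string):
--     """Single left-to-right character scan: rewrite each APP= segment in place,
--     no split/rejoin; append the APP parameter if no segment matched."""
--     s = connection_string
--     n = len(s)
--     pieces = []
--     found = False
--     i = 0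
--     while True:
--         if s[i:i + 4].lower() == "app=":
--             found = True
--             pieces.append(s[i:i + 3] + "=MSSQL-Python")
--             i += 4
--             while i < n and s[i] != ";":
--                 i += 1
--         else:
--             j = i
--             while j < n and s[j] != ";":
--                 j += 1
--             pieces.append(s[i:j])
--             i = j
--         if i < n:
--             pieces.append(";")
--             i += 1
--         else:
--             break
--     body = "".join(pieces)
--     return body + (";" if found else ";APP=MSSQL-Python;")
-- ===== Notes on version B (the rewrite author's own statement) =====
-- stated objective: alternative
-- what changed: Replaces split(';')/per-segment loop/';'.join with a single left-to-right character scan that rewrites each APP= segment's value in place and re-emits separators as it goes.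
import Mathlib
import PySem

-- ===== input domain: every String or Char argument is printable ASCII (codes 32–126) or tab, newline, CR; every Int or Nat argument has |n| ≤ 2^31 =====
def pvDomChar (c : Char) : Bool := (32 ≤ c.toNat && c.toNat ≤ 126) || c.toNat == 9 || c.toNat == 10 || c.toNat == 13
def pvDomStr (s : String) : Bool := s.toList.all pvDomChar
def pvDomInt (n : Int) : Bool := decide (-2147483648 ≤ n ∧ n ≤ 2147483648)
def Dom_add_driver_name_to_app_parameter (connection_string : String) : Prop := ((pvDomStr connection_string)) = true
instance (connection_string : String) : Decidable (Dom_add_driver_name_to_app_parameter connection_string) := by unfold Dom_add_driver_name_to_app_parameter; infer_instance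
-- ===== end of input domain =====

-- B replaces A's split(";") / per-segment loop / ";".join with a single left-to-right
-- character scan rewriting each APP= segment in place (objective: alternative, same cost).

-- ===== PORT A =====
-- loop body of A's 'for param in parameters' (state: (app_found, modified_parameters))
def pvA_step (st : Bool × List (List Char)) (param : List Char) : Bool × List (List Char) :=
  if PySem.Chars.startswith (PySem.Chars.lower param) ("app=".toList) then
    -- key, _ = param.split("=", 1); append f"{key}=MSSQL-Python"
    (true, st.2 ++ [((PySem.Chars.splitOnMax param ['='] 1).headD []) ++ "=MSSQL-Python".toList])
  else
    (st.1, st.2 ++ [param])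

def add_driver_name_to_app_parameter (connection_string : String) : String :=
  let parameters := PySem.Chars.splitOn connection_string.toList [';']
  let st := parameters.foldl pvA_step (false, [])
  let modified := if st.1 then st.2 else st.2 ++ ["APP=MSSQL-Python".toList]
  String.ofList (PySem.Chars.join [';'] modified ++ [';'])

-- ===== PORT B =====
-- one pass over the characters: at each segment start, either rewrite an APP= segment
-- (copy the 3 key chars, drop the value up to the next separator) or copy the segment verbatim
def pvB_go (rest : List Char) : List Char × Bool :=
  if PySem.Chars.lower (rest.take 4) = "app=".toList then
    match _hsep : (rest.drop 4).dropWhile (· ≠ ';') with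
    | [] => (rest.take 3 ++ "=MSSQL-Python".toList, true)
    | _ :: r =>
      let p := pvB_go r
      (rest.take 3 ++ "=MSSQL-Python".toList ++ ';' :: p.1, true)
  else
    match _hsep : rest.dropWhile (· ≠ ';') with
    | [] => (rest, false)
    | _ :: r =>
      let p := pvB_go r
      (rest.takeWhile (· ≠ ';') ++ ';' :: p.1, p.2)
termination_by rest.length
decreasing_by
  · have h1 := List.length_dropWhile_le (p := fun c => decide (c ≠ ';')) (l := rest.drop 4)
    rw [_hsep] at h1
    simp only [List.length_cons, List.length_drop] at h1
    omega
  · have h1 := List.length_dropWhile_le (p := fun c => decide (c ≠ ';')) (l := rest)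
    rw [_hsep] at h1
    simp only [List.length_cons] at h1
    omega

def add_driver_name_to_app_parameter_alt (connection_string : String) : String :=
  let p := pvB_go connection_string.toList
  String.ofList (p.1 ++ (if p.2 then [';'] else ";APP=MSSQL-Python;".toList))

-- ===== PRECONDITION & SPEC =====
def Spec_add_driver_name_to_app_parameter (connection_string : String) (out : String) : Prop := out = add_driver_name_to_app_parameter_alt connection_string
instance (connection_string : String) (out : String) : Decidable (Spec_add_driver_name_to_app_parameter connection_string out) := by unfold Spec_add_driver_name_to_app_parameter; infer_instance

-- ===== CLAIM (what is proved, stated in full; the proofs are below) =====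
def Claim_equal_add_driver_name_to_app_parameter : Prop := ∀ (connection_string : String), Dom_add_driver_name_to_app_parameter connection_string → Spec_add_driver_name_to_app_parameter connection_string (add_driver_name_to_app_parameter connection_string)

-- ===== LEMMAS AND PROOFS =====

-- the segment list produced by the semicolon split
def pvSegs : List Char → List (List Char)
  | [] => [[]]
  | c :: r => if c = ';' then [] :: pvSegs r
              else (c :: (pvSegs r).headD []) :: (pvSegs r).tail

def pvSegsTail (d : List Char) : List (List Char) :=
  match d with
  | [] => []
  | _ :: r => pvSegs r

-- A's per-segment transformation and detection condition
def pvCondA (p : List Char) : Bool := PySem.Chars.startswith (PySem.Chars.lower p) ("app=".toList)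

def pvG (p : List Char) : List Char :=
  if pvCondA p then ((PySem.Chars.splitOnMax p ['='] 1).headD []) ++ "=MSSQL-Python".toList else p

lemma pvToNat_ofNat (n : Nat) (h : Nat.isValidChar n) : (Char.ofNat n).toNat = n := by
  simp [Char.ofNat, h, Char.toNat, Char.ofNatAux]

lemma pvChar_le_iff (d e : Char) : (d ≤ e) ↔ d.toNat ≤ e.toNat := by
  rw [Char.le_def, UInt32.le_iff_toNat_le]; rfl

lemma pvLowerChar_toNat (c : Char) :
    (PySem.Chars.lowerChar c).toNat = if 65 ≤ c.toNat ∧ c.toNat ≤ 90 then c.toNat + 32 else c.toNat := by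
  unfold PySem.Chars.lowerChar PySem.Chars.isupper
  have hA : ('A' : Char).toNat = 65 ∧ ('Z' : Char).toNat = 90 := by decide
  split
  · next h =>
    simp only [Bool.and_eq_true, decide_eq_true_eq, pvChar_le_iff] at h
    rw [if_pos (by omega), pvToNat_ofNat _ (Or.inl (by omega))]
  · next h =>
    simp only [Bool.and_eq_true, decide_eq_true_eq, pvChar_le_iff, not_and_or, not_le] at h
    rw [if_neg (by omega)]

lemma pvChar_toNat_inj {c d : Char} (h : c.toNat = d.toNat) : c = d := by
  exact Char.ext (UInt32.toNat_inj.mp h)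

lemma pvLowerChar_eq_eq {c : Char} (h : PySem.Chars.lowerChar c = '=') : c = '=' := by
  have h2 := congrArg Char.toNat h
  rw [pvLowerChar_toNat] at h2
  have : ('=' : Char).toNat = 61 := by decide
  apply pvChar_toNat_inj
  rw [this]
  split at h2 <;> omega

lemma pvLowerChar_a_ne {c : Char} (h : PySem.Chars.lowerChar c = 'a') : c ≠ ';' ∧ c ≠ '=' := by
  have h2 := congrArg Char.toNat h
  rw [pvLowerChar_toNat] at h2
  have ha : ('a' : Char).toNat = 97 := by decide
  rw [ha] at h2
  constructor <;> rintro rfl <;> revert h2 <;> split <;> simp_all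

lemma pvLowerChar_p_ne {c : Char} (h : PySem.Chars.lowerChar c = 'p') : c ≠ ';' ∧ c ≠ '=' := by
  have h2 := congrArg Char.toNat h
  rw [pvLowerChar_toNat] at h2
  have ha : ('p' : Char).toNat = 112 := by decide
  rw [ha] at h2
  constructor <;> rintro rfl <;> revert h2 <;> split <;> simp_all

lemma pvSegs_ne_nil (l : List Char) : pvSegs l ≠ [] := by
  cases l with
  | nil => simp [pvSegs]
  | cons c r => simp only [pvSegs]; split <;> simp

lemma pvSegs_go_eq (fuel : ℕ) (l cur : List Char) (acc : List (List Char))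
    (h : l.length < fuel) :
    PySem.Chars.splitOn.go [';'] fuel l cur acc =
      acc.reverse ++ (cur.reverse ++ (pvSegs l).headD []) :: (pvSegs l).tail := by
  induction l generalizing fuel cur acc with
  | nil =>
    cases fuel with
    | zero => omega
    | succ f => simp [PySem.Chars.splitOn.go, pvSegs]
  | cons c r ih =>
    cases fuel with
    | zero => omega
    | succ f =>
      rw [PySem.Chars.splitOn.go]
      by_cases hc : c = ';'
      · subst hc
        rw [if_pos (by simp [List.isPrefixOf])]
        simp only [List.length_cons, List.drop_succ_cons, List.length_nil, List.drop_zero]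
        rw [ih f [] ((cur.reverse) :: acc) (by simp at h; omega)]
        have hne := pvSegs_ne_nil r
        simp [pvSegs]
        cases hr : pvSegs r with
        | nil => exact absurd hr hne
        | cons q t => simp
      · rw [if_neg (by simp [List.isPrefixOf]; exact fun h => hc h.symm)]
        rw [ih f (c :: cur) acc (by simp at h; omega)]
        have hne := pvSegs_ne_nil r
        simp only [pvSegs, if_neg hc]
        cases hr : pvSegs r with
        | nil => exact absurd hr hne
        | cons q t => simp

lemma splitOn_eq_pvSegs (cs : List Char) :
    PySem.Chars.splitOn cs [';'] = pvSegs cs := by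
  unfold PySem.Chars.splitOn
  rw [pvSegs_go_eq _ _ _ _ (by omega)]
  have hne := pvSegs_ne_nil cs
  cases hr : pvSegs cs with
  | nil => exact absurd hr hne
  | cons q t => simp

lemma pvSegs_eq (cs : List Char) :
    pvSegs cs = (cs.takeWhile (· ≠ ';')) :: pvSegsTail (cs.dropWhile (· ≠ ';')) := by
  induction cs with
  | nil => simp [pvSegs, pvSegsTail]
  | cons c r ih =>
    by_cases hc : c = ';'
    · subst hc
      simp [pvSegs, pvSegsTail]
    · simp only [pvSegs, if_neg hc, List.takeWhile_cons, List.dropWhile_cons]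
      simp only [hc, decide_not, ih]
      simp

lemma pvSplitOnMax_go_zero (fuel : ℕ) (l cur : List Char) (acc : List (List Char)) :
    PySem.Chars.splitOnMax.go ['='] fuel 0 l cur acc = ((cur.reverse ++ l) :: acc).reverse := by
  cases fuel with
  | zero => rw [PySem.Chars.splitOnMax.go]
  | succ f =>
    cases l with
    | nil => rw [PySem.Chars.splitOnMax.go]; simp
             omega
    | cons c r => rw [PySem.Chars.splitOnMax.go]; simp

lemma pvSplitOnMax_go_one (fuel : ℕ) (l cur : List Char) (acc : List (List Char))
    (h : l.length < fuel) (he : '=' ∈ l) :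
    PySem.Chars.splitOnMax.go ['='] fuel 1 l cur acc =
      acc.reverse ++ [cur.reverse ++ l.takeWhile (· ≠ '='), (l.dropWhile (· ≠ '=')).tail] := by
  induction l generalizing fuel cur acc with
  | nil => simp at he
  | cons c r ih =>
    cases fuel with
    | zero => omega
    | succ f =>
      rw [PySem.Chars.splitOnMax.go]
      by_cases hc : c = '='
      · subst hc
        rw [if_neg (by omega), if_pos (by simp [List.isPrefixOf])]
        simp only [List.length_cons, List.drop_succ_cons, List.length_nil, List.drop_zero]
        rw [pvSplitOnMax_go_zero]
        simp
      · rw [if_neg (by omega), if_neg (by simp [List.isPrefixOf]; exact fun h => hc h.symm)]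
        rw [ih f (c :: cur) acc (by simp at h; omega) (by simp at he; tauto)]
        simp [hc]

lemma pvSplitOnMax_one (p : List Char) (he : '=' ∈ p) :
    PySem.Chars.splitOnMax p ['='] 1 = [p.takeWhile (· ≠ '='), (p.dropWhile (· ≠ '=')).tail] := by
  unfold PySem.Chars.splitOnMax
  rw [if_neg (by omega)]
  rw [show (1 : ℤ).toNat = 1 from rfl]
  rw [pvSplitOnMax_go_one _ _ _ _ (by omega) he]
  simp

lemma pvFoldl_eq (segs : List (List Char)) (f : Bool) (acc : List (List Char)) :
    segs.foldl pvA_step (f, acc) = (f || segs.any pvCondA, acc ++ segs.map pvG) := by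
  induction segs generalizing f acc with
  | nil => simp
  | cons p t ih =>
    simp only [List.foldl_cons, List.any_cons, List.map_cons, pvA_step, pvG, pvCondA]
    by_cases hc : PySem.Chars.startswith (PySem.Chars.lower p) ("app=".toList)
    · simp only [hc, if_pos, ih, Bool.true_or, Bool.or_true]
      simp
    · simp only [hc, Bool.false_eq_true, ih, Bool.false_or]
      simp

lemma pvCondA_iff (p : List Char) :
    pvCondA p = true ↔ PySem.Chars.lower (p.take 4) = "app=".toList := by
  unfold pvCondA PySem.Chars.startswith PySem.Chars.lower
  rw [List.isPrefixOf_iff_prefix, List.prefix_iff_eq_take]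
  rw [show ("app=".toList).length = 4 from rfl, List.map_take]
  constructor <;> intro h <;> exact h.symm

lemma pvIsApp_append (p rest' : List Char)
    (hr : rest' = [] ∨ ∃ r, rest' = ';' :: r) :
    (PySem.Chars.lower ((p ++ rest').take 4) = "app=".toList) ↔
      (PySem.Chars.lower (p.take 4) = "app=".toList) := by
  by_cases h4 : 4 ≤ p.length
  · rw [List.take_append_of_le_length h4]
  · push Not at h4
    constructor <;> intro h
    · exfalso
      rcases hr with rfl | ⟨r, rfl⟩
      · have := congrArg List.length h
        simp [PySem.Chars.lower] at this
        omega
      · -- the char at index p.length of the take-4 window is ';', but "app=" has none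
        have hlen : p.length < ((p ++ ';' :: r).take 4).length := by
          simp [List.length_take]
          omega
        have hget : ((p ++ ';' :: r).take 4)[p.length]'hlen = ';' := by
          rw [List.getElem_take, List.getElem_append_right (by omega)]
          simp
        have h2 := congrArg (fun l => l[p.length]?) h
        simp only [PySem.Chars.lower, List.getElem?_map] at h2
        rw [List.getElem?_eq_getElem hlen, hget] at h2
        have h3 : ("app=".toList)[p.length]? = some ';' := by
          rw [← h2]
          simp only [Option.map_some]
          decide
        interval_cases hp : p.length <;> simp_all
    · exfalso
      have := congrArg List.length h
      simp [PySem.Chars.lower, List.length_take] at this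
      omega

lemma pvJoin_append_singleton (l : List (List Char)) (x : List Char) (hl : l ≠ []) :
    PySem.Chars.join [';'] (l ++ [x]) = PySem.Chars.join [';'] l ++ ';' :: x := by
  induction l with
  | nil => simp at hl
  | cons a t ih =>
    cases t with
    | nil => rw [show (([a] : List (List Char)) ++ [x]) = [a, x] from rfl,
                 PySem.Chars.join_cons_cons, PySem.Chars.join_singleton, PySem.Chars.join_singleton]
             simp
    | cons b t2 =>
      rw [show ((a :: b :: t2) ++ [x]) = a :: ((b :: t2) ++ [x]) from rfl]
      rw [show ((b :: t2) ++ [x]) = b :: (t2 ++ [x]) from rfl]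
      rw [PySem.Chars.join_cons_cons, PySem.Chars.join_cons_cons]
      rw [show (b :: (t2 ++ [x])) = (b :: t2) ++ [x] from rfl]
      rw [ih (by simp)]
      simp

lemma pvDropWhile_semi (cs : List Char) :
    cs.dropWhile (· ≠ ';') = [] ∨ ∃ r, cs.dropWhile (· ≠ ';') = ';' :: r := by
  induction cs with
  | nil => left; rfl
  | cons c r ih =>
    by_cases hc : c = ';'
    · subst hc; right; exact ⟨r, by simp⟩
    · simpa [hc] using ih

lemma pvB_go_spec (cs : List Char) :
    pvB_go cs = (PySem.Chars.join [';'] ((pvSegs cs).map pvG), (pvSegs cs).any pvCondA) := by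
  induction hn : cs.length using Nat.strong_induction_on generalizing cs with
  | _ n IH =>
  subst hn
  rw [pvB_go]
  by_cases happ : PySem.Chars.lower (cs.take 4) = "app=".toList
  · -- APP segment at the front
    rw [if_pos happ]
    rw [show ("app=".toList) = ['a', 'p', 'p', '='] from rfl] at happ
    obtain ⟨c0, c1, c2, c3, rest, rfl⟩ :
        ∃ c0 c1 c2 c3 rest, cs = c0 :: c1 :: c2 :: c3 :: rest := by
      cases cs with
      | nil => exact absurd happ (by simp [PySem.Chars.lower])
      | cons c0 t0 =>
      cases t0 with
      | nil => exact absurd happ (by simp [PySem.Chars.lower])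
      | cons c1 t1 =>
      cases t1 with
      | nil => exact absurd happ (by simp [PySem.Chars.lower])
      | cons c2 t2 =>
      cases t2 with
      | nil => exact absurd happ (by simp [PySem.Chars.lower])
      | cons c3 rest => exact ⟨c0, c1, c2, c3, rest, rfl⟩
    simp only [List.take_succ_cons, List.take_zero, PySem.Chars.lower, List.map_cons,
      List.map_nil, List.cons.injEq, and_true] at happ
    obtain ⟨h0, h1, h2c, h3⟩ := happ
    have hc3 := pvLowerChar_eq_eq h3
    subst hc3
    have n0 := pvLowerChar_a_ne h0
    have n1 := pvLowerChar_p_ne h1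
    have n2 := pvLowerChar_p_ne h2c
    have hdw : List.dropWhile (fun x => decide (x ≠ ';')) (c0 :: c1 :: c2 :: '=' :: rest) =
        List.dropWhile (fun x => decide (x ≠ ';')) rest := by
      simp [n0.1, n1.1, n2.1]
    have htw : List.takeWhile (fun x => decide (x ≠ ';')) (c0 :: c1 :: c2 :: '=' :: rest) =
        c0 :: c1 :: c2 :: '=' :: List.takeWhile (fun x => decide (x ≠ ';')) rest := by
      simp [n0.1, n1.1, n2.1]
    set p := c0 :: c1 :: c2 :: '=' :: List.takeWhile (fun x => decide (x ≠ ';')) rest with hpdef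
    have hcond : pvCondA p = true := by
      rw [pvCondA_iff, hpdef]
      simp only [List.take_succ_cons, List.take_zero, PySem.Chars.lower, List.map_cons,
        List.map_nil]
      simp [h0, h1, h2c, h3]
    have hG : pvG p = (c0 :: c1 :: c2 :: "=MSSQL-Python".toList) := by
      rw [pvG, if_pos hcond]
      rw [pvSplitOnMax_one p (by rw [hpdef]; simp)]
      rw [hpdef]
      simp only [List.headD_cons, List.takeWhile_cons]
      simp [n0.2, n1.2, n2.2]
    rw [pvSegs_eq, htw, hdw]
    simp only [List.drop_succ_cons, List.drop_zero]
    split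
    · next h2 =>
      rw [h2]
      simp only [pvSegsTail, List.map_cons, List.map_nil, List.any_cons, List.any_nil,
        Bool.or_false, hcond, hG, PySem.Chars.join_singleton]
      simp only [Prod.mk.injEq]
      refine ⟨?_, trivial⟩
      have hrest : List.takeWhile (fun x => decide (x ≠ ';')) rest = rest := by
        have h5 := List.takeWhile_append_dropWhile (p := fun c => decide (c ≠ ';')) (l := rest)
        rw [h2] at h5
        simpa using h5
      simp
    · next x r h2 =>
      have hr : r.length < (c0 :: c1 :: c2 :: '=' :: rest).length := by
        have h1' := List.length_dropWhile_le (p := fun c => decide (c ≠ ';')) (l := rest)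
        rw [h2] at h1'
        simp at h1' ⊢
        omega
      rw [h2]
      simp only [pvSegsTail]
      rw [IH r.length hr r rfl]
      obtain ⟨q, t, hqt⟩ : ∃ q t, pvSegs r = q :: t := by
        cases h : pvSegs r with
        | nil => exact absurd h (pvSegs_ne_nil r)
        | cons q t => exact ⟨q, t, rfl⟩
      rw [hqt]
      simp only [List.map_cons, List.any_cons, PySem.Chars.join_cons_cons, hcond, hG,
        Bool.true_or]
      simp only [Prod.mk.injEq]
      refine ⟨?_, trivial⟩
      simp
  · rw [if_neg happ]
    rw [pvSegs_eq cs]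
    have hcond : pvCondA (cs.takeWhile (· ≠ ';')) = false := by
      rw [← Bool.not_eq_true, pvCondA_iff]
      intro hq
      apply happ
      rw [← List.takeWhile_append_dropWhile (p := fun c => decide (c ≠ ';')) (l := cs)]
      rw [pvIsApp_append _ _ (pvDropWhile_semi cs)]
      exact hq
    have hGtw : pvG (cs.takeWhile (· ≠ ';')) = cs.takeWhile (· ≠ ';') := by
      rw [pvG, if_neg (by rw [hcond]; simp)]
    split
    · next h2 =>
      -- no separator in cs: single segment, the whole string
      have hp : cs.takeWhile (· ≠ ';') = cs := by
        have h5 := List.takeWhile_append_dropWhile (p := fun c => decide (c ≠ ';')) (l := cs)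
        rw [h2] at h5
        simpa using h5
      rw [h2]
      simp only [pvSegsTail, List.map_cons, List.map_nil, List.any_cons, List.any_nil,
        Bool.or_false, PySem.Chars.join_singleton]
      rw [hp] at hGtw hcond
      rw [hp, hGtw, hcond]
    · next x r h2 =>
      have hr : r.length < cs.length := by
        have h1' := List.length_dropWhile_le (p := fun c => decide (c ≠ ';')) (l := cs)
        rw [h2] at h1'
        simp at h1'
        omega
      rw [h2]
      simp only [pvSegsTail]
      rw [IH r.length hr r rfl]
      obtain ⟨q, t, hqt⟩ : ∃ q t, pvSegs r = q :: t := by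
        cases h : pvSegs r with
        | nil => exact absurd h (pvSegs_ne_nil r)
        | cons q t => exact ⟨q, t, rfl⟩
      rw [hqt]
      simp only [List.map_cons, List.any_cons, PySem.Chars.join_cons_cons, hcond, hGtw,
        Bool.false_or]
      simp only [Prod.mk.injEq]
      refine ⟨?_, trivial⟩
      simp

-- ===== VERDICT (by name: the statement is the Claim_ definition above) =====
theorem add_driver_name_to_app_parameter_spec : Claim_equal_add_driver_name_to_app_parameter := by
  intro s _
  unfold Spec_add_driver_name_to_app_parameter
  unfold add_driver_name_to_app_parameter add_driver_name_to_app_parameter_alt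
  dsimp only
  rw [splitOn_eq_pvSegs, pvFoldl_eq, pvB_go_spec]
  simp only [List.nil_append]
  by_cases hf : (pvSegs s.toList).any pvCondA
  · simp [hf]
  · have hne : List.map pvG (pvSegs s.toList) ≠ [] := by
      simpa using pvSegs_ne_nil s.toList
    rw [Bool.not_eq_true] at hf
    rw [hf]
    simp only [Bool.or_false, Bool.false_eq_true, if_false]
    rw [pvJoin_append_singleton _ _ hne]
    simp [List.append_assoc]
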